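-- pv_equiv track=rewrite | github.com/humblemat810/kogwistar | kogwistar/demo/graph_native_artifact_demo.py | link_notes
-- ===== SOURCE A (Python) =====
-- from typing import Any, Mapping, Sequence
--
-- def link_notes(
--     normalized_notes: Sequence[Mapping[str, Any]], state: Mapping[str, Any]
-- ) -> list[dict[str, Any]]:
--     _ = state
--     anchors: dict[str, Mapping[str, Any]] = {}
--     edges: list[dict[str, Any]] = []
--     for note in normalized_notes:
--         topic = str(note.get("topic") or "general")
--         anchor = anchors.get(topic)
--         if anchor is None:
--             anchors[topic] = note
--             continue
--         edges.append(
--             {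
--                 "source": str(anchor.get("id")),
--                 "target": str(note.get("id")),
--                 "relation": "same_topic",
--                 "topic": topic,
--             }
--         )
--     return edges
-- ===== SOURCE B (Python) =====
-- from typing import Any, Mapping, Sequence
--
-- def link_notes(
--     normalized_notes: Sequence[Mapping[str, Any]], state: Mapping[str, Any]
-- ) -> list[dict[str, Any]]:
--     _ = state
--     # pass 1: record for each topic the first note seen and its index
--     anchors: dict[str, tuple[int, Mapping[str, Any]]] = {}
--     for i, note in enumerate(normalized_notes):
--         topic = str(note.get("topic") or "general")
--         if topic not in anchors:
--             anchors[topic] = (i, note)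
--     # pass 2: every note that is not its topic's anchor yields an edge
--     edges: list[dict[str, Any]] = []
--     for i, note in enumerate(normalized_notes):
--         topic = str(note.get("topic") or "general")
--         j, anchor = anchors[topic]
--         if i != j:
--             edges.append(
--                 {
--                     "source": str(anchor.get("id")),
--                     "target": str(note.get("id")),
--                     "relation": "same_topic",
--                     "topic": topic,
--                 }
--             )
--     return edges
-- ===== Notes on version B (the rewrite author's own statement) =====
-- stated objective: alternative
-- what changed: Replaces A's single pass that grows the anchor dict while emitting edges by two passes: one that builds the complete topic->(first index, first note) table up front, and a second that emits an edge for every note whose index differs from its topic's recorded first index.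
import Mathlib
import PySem

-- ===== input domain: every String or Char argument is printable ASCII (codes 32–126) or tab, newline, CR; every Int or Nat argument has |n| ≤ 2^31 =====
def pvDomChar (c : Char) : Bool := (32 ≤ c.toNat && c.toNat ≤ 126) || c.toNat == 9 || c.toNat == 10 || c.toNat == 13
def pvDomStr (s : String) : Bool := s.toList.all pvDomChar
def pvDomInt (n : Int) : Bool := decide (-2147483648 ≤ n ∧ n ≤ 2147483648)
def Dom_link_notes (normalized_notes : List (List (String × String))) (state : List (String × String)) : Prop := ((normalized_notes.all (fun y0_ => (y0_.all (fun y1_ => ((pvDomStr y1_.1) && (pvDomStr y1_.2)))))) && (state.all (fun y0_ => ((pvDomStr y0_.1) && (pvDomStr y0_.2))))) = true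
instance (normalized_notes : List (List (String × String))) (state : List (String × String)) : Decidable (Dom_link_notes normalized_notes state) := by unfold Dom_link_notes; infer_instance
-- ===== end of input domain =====

-- B builds the complete topic -> (first index, first note) table in a first pass and emits the
-- edges in a second pass; A grows the anchor dict while emitting.  Objective: alternative
-- decomposition, same cost.

-- shared helpers: Python's note.get(k) on an association-list note (first match), as both
-- Pythons perform the same lookup
def noteGet (note : List (String × String)) (k : String) : Option String :=
  (note.find? (fun p => p.1 == k)).map (·.2)

-- str(note.get("topic") or "general"): only the empty string is falsy here
def topicOf (note : List (String × String)) : String :=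
  match noteGet note "topic" with
  | some s => if s = "" then "general" else s
  | none => "general"

-- str(note.get("id")): str(None) = "None"
def idOf (note : List (String × String)) : String :=
  (noteGet note "id").getD "None"

def mkEdge (src tgt topic : String) : List (String × String) :=
  [("source", src), ("target", tgt), ("relation", "same_topic"), ("topic", topic)]

-- ===== PORT A =====
-- the loop of A: anchors dict and edges accumulator, exactly A's branch order
def linkA : List (List (String × String)) → PySem.Dict String (List (String × String)) →
    List (List (String × String)) → List (List (String × String))
  | [], _, edges => edges
  | note :: rest, anchors, edges =>
    let topic := topicOf note
    match anchors.get? topic with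
    | none => linkA rest (anchors.insert topic note) edges
    | some anchor => linkA rest anchors (edges ++ [mkEdge (idOf anchor) (idOf note) topic])

def link_notes (normalized_notes : List (List (String × String))) (state : List (String × String)) : List (List (String × String)) :=
  let _ := state
  linkA normalized_notes PySem.Dict.empty []

-- ===== PORT B =====
-- pass 1 of B: for i, note in enumerate(...): if topic not in anchors: anchors[topic] = (i, note)
def buildAnchors : List (List (String × String)) → Int →
    PySem.Dict String (Int × List (String × String)) → PySem.Dict String (Int × List (String × String))
  | [], _, acc => acc
  | note :: rest, i, acc =>
    let topic := topicOf note
    buildAnchors rest (i + 1) (if acc.contains topic then acc else acc.insert topic (i, note))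

-- pass 2 of B: anchors[topic] always succeeds in the Python (the table covers every topic of the
-- list); the none branch below is unreachable on those inputs
def emitEdges : List (List (String × String)) → Int →
    PySem.Dict String (Int × List (String × String)) → List (List (String × String)) →
    List (List (String × String))
  | [], _, _, edges => edges
  | note :: rest, i, anchors, edges =>
    let topic := topicOf note
    match anchors.get? topic with
    | some (j, anchor) =>
        emitEdges rest (i + 1) anchors
          (if i ≠ j then edges ++ [mkEdge (idOf anchor) (idOf note) topic] else edges)
    | none => emitEdges rest (i + 1) anchors edges

def link_notes_alt (normalized_notes : List (List (String × String))) (state : List (String × String)) : List (List (String × String)) :=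
  let _ := state
  emitEdges normalized_notes 0 (buildAnchors normalized_notes 0 PySem.Dict.empty) []

-- ===== PRECONDITION & SPEC =====
def Spec_link_notes (normalized_notes : List (List (String × String))) (state : List (String × String)) (out : List (List (String × String))) : Prop := out = link_notes_alt normalized_notes state
instance (normalized_notes : List (List (String × String))) (state : List (String × String)) (out : List (List (String × String))) : Decidable (Spec_link_notes normalized_notes state out) := by unfold Spec_link_notes; infer_instance

-- ===== CLAIM (what is proved, stated in full; the proofs are below) =====
def Claim_equal_link_notes : Prop := ∀ (normalized_notes : List (List (String × String))) (state : List (String × String)), Dom_link_notes normalized_notes state → Spec_link_notes normalized_notes state (link_notes normalized_notes state)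

-- ===== LEMMAS AND PROOFS =====

-- closed form for the first-pass table: first occurrence of a topic, with its index
def firstOcc : List (List (String × String)) → Int → String → Option (Int × List (String × String))
  | [], _, _ => none
  | note :: rest, i, t => if topicOf note = t then some (i, note) else firstOcc rest (i + 1) t

lemma buildAnchors_get? (ns : List (List (String × String))) :
    ∀ (i : Int) (acc : PySem.Dict String (Int × List (String × String))) (t : String),
    (buildAnchors ns i acc).get? t =
      match acc.get? t with
      | some v => some v
      | none => firstOcc ns i t := by
  induction ns with
  | nil => intro i acc t; simp only [buildAnchors, firstOcc]; cases acc.get? t <;> rfl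
  | cons note rest ih =>
    intro i acc t
    simp only [buildAnchors, firstOcc]
    by_cases hc : acc.contains (topicOf note) = true
    · rw [if_pos hc]
      rw [ih]
      cases h : acc.get? t with
      | some v => rfl
      | none =>
        have ht : ¬ topicOf note = t := by
          intro he
          rw [PySem.Dict.contains_eq_isSome_get?, he, h] at hc
          simp at hc
        simp [ht]
    · rw [if_neg hc]
      rw [ih, PySem.Dict.get?_insert]
      by_cases he : t = topicOf note
      · subst he
        rw [PySem.Dict.contains_eq_isSome_get?] at hc
        cases h : acc.get? (topicOf note) with
        | some v => rw [h] at hc; simp at hc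
        | none => simp
      · simp only [he, if_false]
        cases h : acc.get? t with
        | some v => rfl
        | none =>
          have hne : ¬ topicOf note = t := fun hh => he hh.symm
          simp [hne]

-- main invariant: A's running anchor dict agrees with the full table T on topics already seen,
-- and T equals the first occurrence of the remaining suffix on topics not yet seen
lemma linkA_eq_emitEdges (ns : List (List (String × String))) :
    ∀ (i : Int) (d : PySem.Dict String (List (String × String)))
      (T : PySem.Dict String (Int × List (String × String)))
      (edges : List (List (String × String))),
    (∀ t a, d.get? t = some a → ∃ j, T.get? t = some (j, a) ∧ j < i) →
    (∀ t, d.get? t = none → T.get? t = firstOcc ns i t) →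
    linkA ns d edges = emitEdges ns i T edges := by
  induction ns with
  | nil => intro i d T edges _ _; rfl
  | cons note rest ih =>
    intro i d T edges h1 h2
    simp only [linkA, emitEdges]
    cases hd : d.get? (topicOf note) with
    | none =>
      have hT : T.get? (topicOf note) = some (i, note) := by
        rw [h2 _ hd]; simp [firstOcc]
      rw [hT]
      simp only [ne_eq, not_true_eq_false, if_false]
      apply ih
      · intro t a ht
        by_cases he : t = topicOf note
        · subst he
          rw [PySem.Dict.get?_insert_self] at ht
          exact ⟨i, by rw [hT, Option.some_inj.mp ht], by omega⟩
        · rw [PySem.Dict.get?_insert_of_ne _ _ he] at ht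
          obtain ⟨j, hj, hlt⟩ := h1 t a ht
          exact ⟨j, hj, by omega⟩
      · intro t ht
        by_cases he : t = topicOf note
        · subst he; rw [PySem.Dict.get?_insert_self] at ht; simp at ht
        · rw [PySem.Dict.get?_insert_of_ne _ _ he] at ht
          rw [h2 t ht]
          have hne2 : ¬ topicOf note = t := fun hh => he hh.symm
          simp [firstOcc, hne2]
    | some anchor =>
      obtain ⟨j, hj, hlt⟩ := h1 _ anchor hd
      rw [hj]
      have hne : i ≠ j := by omega
      simp only [hne, ne_eq, not_false_eq_true, if_true]
      apply ih
      · intro t a ht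
        obtain ⟨j', hj', hlt'⟩ := h1 t a ht
        exact ⟨j', hj', by omega⟩
      · intro t ht
        have he : topicOf note ≠ t := by intro hh; rw [hh] at hd; rw [hd] at ht; cases ht
        rw [h2 t ht]
        simp [firstOcc, he]

-- ===== VERDICT (by name: the statement is the Claim_ definition above) =====
theorem link_notes_spec : Claim_equal_link_notes := by
  intro ns st _
  unfold Spec_link_notes link_notes link_notes_alt
  apply linkA_eq_emitEdges
  · intro t a h; rw [PySem.Dict.get?_empty] at h; cases h
  · intro t _
    rw [buildAnchors_get? ns 0 PySem.Dict.empty t, PySem.Dict.get?_empty]
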